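-- pv_equiv track=rewrite | github.com/MrBrantCode/unitest_baseline | mut_generate/mist_train_cf/cf_60359/solution.py | replace_cat_with_dog
-- ===== SOURCE A (Python) =====
-- def replace_cat_with_dog(s):
--     i = 0
--     output = ""
--     while i < len(s):
--         if s[i:i+3] == "cat":
--             output += "dog"
--             i += 3
--         else:
--             output += s[i]
--             i += 1
--     return output
-- ===== SOURCE B (Python) =====
-- def replace_cat_with_dog(s):
--     return s.replace("cat", "dog")
-- ===== Notes on version B (the rewrite author's own statement) =====
-- stated objective: idiomatic
-- what changed: The hand-written per-character while-loop with quadratic string concatenation is replaced by a single call to the built-in str.replace (same non-overlapping left-to-right substitution), which runs in linear time.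
import Mathlib
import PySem

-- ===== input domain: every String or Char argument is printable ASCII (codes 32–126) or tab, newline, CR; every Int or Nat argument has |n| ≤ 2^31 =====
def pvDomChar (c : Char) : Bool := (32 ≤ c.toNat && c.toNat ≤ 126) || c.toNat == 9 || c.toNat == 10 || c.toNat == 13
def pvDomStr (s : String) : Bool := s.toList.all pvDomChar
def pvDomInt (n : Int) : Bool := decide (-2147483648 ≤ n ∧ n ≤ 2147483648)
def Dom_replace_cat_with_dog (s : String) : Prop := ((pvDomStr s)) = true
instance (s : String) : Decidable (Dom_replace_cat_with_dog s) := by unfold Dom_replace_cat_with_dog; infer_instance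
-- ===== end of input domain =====

-- B replaces A's per-character while-loop by the built-in str.replace (idiomatic; same non-overlapping left-to-right substitution).

-- ===== PORT A =====
-- A's while-loop: index i, accumulator `output`; checks s[i:i+3] == "cat" at each position.
def pvAgo (cs : List Char) (i : Nat) (output : List Char) : List Char :=
  if h : i < cs.length then
    if PySem.Chars.slice cs (some (i : Int)) (some ((i : Int) + 3)) = ['c', 'a', 't'] then
      pvAgo cs (i + 3) (output ++ ['d', 'o', 'g'])
    else
      pvAgo cs (i + 1) (output ++ [cs[i]])
  else output
termination_by cs.length - i

def replace_cat_with_dog (s : String) : String := String.ofList (pvAgo s.toList 0 [])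

-- ===== PORT B =====
def replace_cat_with_dog_alt (s : String) : String := PySem.Str.replace s "cat" "dog"

-- ===== PRECONDITION & SPEC =====
def Spec_replace_cat_with_dog (s : String) (out : String) : Prop := out = replace_cat_with_dog_alt s
instance (s : String) (out : String) : Decidable (Spec_replace_cat_with_dog s out) := by unfold Spec_replace_cat_with_dog; infer_instance

-- ===== CLAIM (what is proved, stated in full; the proofs are below) =====
def Claim_equal_replace_cat_with_dog : Prop := ∀ (s : String), Dom_replace_cat_with_dog s → Spec_replace_cat_with_dog s (replace_cat_with_dog s)

-- ===== LEMMAS AND PROOFS =====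

-- Common specification of a single left-to-right non-overlapping cat→dog pass.
def pvScan : List Char → List Char
  | [] => []
  | c :: t =>
    if ['c', 'a', 't'].isPrefixOf (c :: t) then 'd' :: 'o' :: 'g' :: pvScan (t.drop 2)
    else c :: pvScan t
termination_by l => l.length
decreasing_by all_goals simp

theorem pvAgo_eq_scan (cs : List Char) (i : Nat) (output : List Char) :
    pvAgo cs i output = output ++ pvScan (cs.drop i) := by
  have hslice : ∀ j : Nat, PySem.Chars.slice cs (some (j : Int)) (some ((j : Int) + 3))
      = List.take 3 (List.drop j cs) := by
    intro j
    have := PySem.List.slice_natCast_add cs j 3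
    simpa [PySem.Chars.slice] using this
  induction i, output using pvAgo.induct cs with
  | case1 i output h hcat ih =>
    have hcat' : List.take 3 (List.drop i cs) = ['c', 'a', 't'] := by rw [← hslice]; exact hcat
    have hpre : (['c', 'a', 't'] : List Char).isPrefixOf (List.drop i cs) = true := by
      rw [List.isPrefixOf_iff_prefix, List.prefix_iff_eq_take]; exact hcat'.symm
    rw [pvAgo, dif_pos h, if_pos hcat, ih]
    rw [List.drop_eq_getElem_cons h] at hpre ⊢
    rw [pvScan, if_pos hpre]
    have hdd : List.drop 2 (List.drop (i + 1) cs) = List.drop (i + 3) cs := by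
      rw [List.drop_drop]
    simp [hdd]
  | case2 i output h hcat ih =>
    have hcat' : List.take 3 (List.drop i cs) ≠ ['c', 'a', 't'] := by rw [← hslice]; exact hcat
    have hpreP : ¬ (['c', 'a', 't'] : List Char) <+: List.drop i cs := by
      intro hp
      rw [List.prefix_iff_eq_take] at hp
      exact hcat' (by simpa using hp.symm)
    rw [pvAgo, dif_pos h, if_neg hcat, ih]
    rw [List.drop_eq_getElem_cons h]
    rw [pvScan, if_neg (by simp; exact hpreP)]
    simp
  | case3 i output h =>
    rw [pvAgo, dif_neg h]
    rw [List.drop_eq_nil_of_le (by omega)]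
    simp [pvScan]

theorem pvReplaceGo_eq_scan (fuel : Nat) (l acc : List Char) (hf : l.length ≤ fuel) :
    PySem.Chars.replace.go ['c', 'a', 't'] ['d', 'o', 'g'] fuel l acc = acc.reverse ++ pvScan l := by
  induction fuel generalizing l acc with
  | zero =>
    have : l = [] := by simpa using List.eq_nil_of_length_eq_zero (by omega)
    subst this
    simp [PySem.Chars.replace.go, pvScan]
  | succ fuel ih =>
    cases l with
    | nil => simp [PySem.Chars.replace.go, pvScan]
    | cons c t =>
      rw [PySem.Chars.replace.go]
      by_cases hp : (['c', 'a', 't'] : List Char).isPrefixOf (c :: t) = true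
      · rw [if_pos hp]
        have hlen : (t.drop 2).length ≤ fuel := by simp at hf ⊢; omega
        rw [ih _ _ (by simpa using hlen)]
        rw [pvScan, if_pos hp]
        simp
      · rw [if_neg hp]
        have hlen : t.length ≤ fuel := by simp at hf; omega
        rw [ih _ _ hlen]
        rw [pvScan, if_neg hp]
        simp

-- ===== VERDICT (by name: the statement is the Claim_ definition above) =====
theorem replace_cat_with_dog_spec : Claim_equal_replace_cat_with_dog := by
  intro s _
  show replace_cat_with_dog s = replace_cat_with_dog_alt s
  rw [← String.toList_inj]
  unfold replace_cat_with_dog replace_cat_with_dog_alt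
  rw [PySem.Str.toList_replace]
  have hc : ("cat" : String).toList = ['c', 'a', 't'] := by decide
  have hd : ("dog" : String).toList = ['d', 'o', 'g'] := by decide
  rw [hc, hd]
  rw [show PySem.Chars.replace s.toList ['c','a','t'] ['d','o','g']
        = PySem.Chars.replace.go ['c','a','t'] ['d','o','g'] s.toList.length s.toList [] from by
      rw [PySem.Chars.replace]; simp]
  rw [pvReplaceGo_eq_scan _ _ _ (le_refl _)]
  rw [pvAgo_eq_scan]
  simp [String.toList_ofList]
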